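-- pv_equiv track=rewrite | github.com/gilsanguk/Algorithm | 백준/Silver/2193. 이친수/이친수.py | solve
-- ===== SOURCE A (Python) =====
-- def solve(n):
--     if n <= 2:
--         return 1
--     ONE = [1, 0] + [0] * (n - 2)
--     ZERO = [0, 1] + [0] * (n - 2)
--     for i in range(2,n):
--         ONE[i] = ZERO[i-1]
--         ZERO[i] = ONE[i-1] + ZERO[i-1]
--     return ONE[-1] + ZERO[-1]
-- ===== SOURCE B (Python) =====
-- def solve(n):
--     # Fast-doubling Fibonacci: the count of n-digit pinary numbers is fib(n).
--     if n <= 2: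
--         return 1
--
--     def fd(k):
--         # returns (fib(k), fib(k+1))
--         if k == 0:
--             return (0, 1)
--         a, b = fd(k // 2)
--         c = a * (2 * b - a)
--         d = a * a + b * b
--         if k % 2 == 1:
--             return (d, c + d)
--         return (c, d)
--
--     return fd(n)[0]
-- ===== Notes on version B (the rewrite author's own statement) =====
-- stated objective: faster
-- what changed: Replaces the O(n) two-list DP with O(log n) fast-doubling Fibonacci recursion (the answer is fib(n)).
import Mathlib
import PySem

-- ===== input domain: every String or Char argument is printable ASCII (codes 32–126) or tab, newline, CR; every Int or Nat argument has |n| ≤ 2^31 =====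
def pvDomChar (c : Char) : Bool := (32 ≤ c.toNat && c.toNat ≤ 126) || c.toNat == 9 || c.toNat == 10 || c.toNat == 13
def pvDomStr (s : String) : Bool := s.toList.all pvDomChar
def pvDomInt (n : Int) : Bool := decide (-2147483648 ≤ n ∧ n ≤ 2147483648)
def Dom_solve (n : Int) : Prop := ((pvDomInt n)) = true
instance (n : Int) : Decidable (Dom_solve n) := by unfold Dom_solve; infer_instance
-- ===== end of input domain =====

-- B replaces the O(n) two-list DP with O(log n) fast-doubling Fibonacci recursion.

-- ===== PORT A =====
-- one loop iteration: ONE[i] = ZERO[i-1]; ZERO[i] = ONE[i-1] + ZERO[i-1]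
def solveStep (st : List Int × List Int) (i : Int) : List Int × List Int :=
  let one := PySem.List.pySetD st.1 i (PySem.List.pyGetD st.2 (i - 1) 0)
  let zero := PySem.List.pySetD st.2 i
    (PySem.List.pyGetD one (i - 1) 0 + PySem.List.pyGetD st.2 (i - 1) 0)
  (one, zero)

def solve (n : Int) : Int :=
  if n ≤ 2 then 1
  else
    let one := [1, 0] ++ List.replicate (n - 2).toNat (0 : Int)
    let zero := [0, 1] ++ List.replicate (n - 2).toNat (0 : Int)
    let st := (PySem.List.pyRange 2 n 1).foldl solveStep (one, zero)
    PySem.List.pyGetD st.1 (-1) 0 + PySem.List.pyGetD st.2 (-1) 0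

-- ===== PORT B =====
-- fd k = (fib k, fib (k+1)) by fast doubling
def fd (k : Nat) : Int × Int :=
  if _h : k = 0 then (0, 1)
  else
    let p := fd (k / 2)
    let a := p.1
    let b := p.2
    let c := a * (2 * b - a)
    let d := a * a + b * b
    if k % 2 = 1 then (d, c + d) else (c, d)
termination_by k
decreasing_by omega

def solve_alt (n : Int) : Int :=
  if n ≤ 2 then 1 else (fd n.toNat).1

-- ===== PRECONDITION & SPEC =====
def Spec_solve (n : Int) (out : Int) : Prop := out = solve_alt n
instance (n : Int) (out : Int) : Decidable (Spec_solve n out) := by unfold Spec_solve; infer_instance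

-- ===== CLAIM (what is proved, stated in full; the proofs are below) =====
def Claim_equal_solve : Prop := ∀ (n : Int), Dom_solve n → Spec_solve n (solve n)

-- ===== LEMMAS AND PROOFS =====

theorem fd_eq (k : Nat) : fd k = ((Nat.fib k : Int), (Nat.fib (k + 1) : Int)) := by
  induction k using Nat.strong_induction_on with
  | _ k ih =>
    rw [fd]
    by_cases h : k = 0
    · simp [h]
    · have ihm := ih (k / 2) (by omega)
      simp only [h, ihm]
      set m := k / 2 with hm
      have h2m : Nat.fib (2 * m) = Nat.fib m * (2 * Nat.fib (m + 1) - Nat.fib m) :=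
        Nat.fib_two_mul m
      have hle : Nat.fib m ≤ 2 * Nat.fib (m + 1) := by
        have := Nat.fib_le_fib_succ (n := m); omega
      have h2mZ : (Nat.fib (2 * m) : Int) =
          (Nat.fib m : Int) * (2 * (Nat.fib (m + 1) : Int) - (Nat.fib m : Int)) := by
        rw [h2m]; push_cast [hle]; ring
      have h2m1 : (Nat.fib (2 * m + 1) : Int) =
          (Nat.fib m : Int) * (Nat.fib m : Int) +
          (Nat.fib (m + 1) : Int) * (Nat.fib (m + 1) : Int) := by
        have := Nat.fib_two_mul_add_one m
        rw [this]; push_cast; ring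
      by_cases hodd : k % 2 = 1
      · have hk : k = 2 * m + 1 := by omega
        simp only [hodd, if_pos, dite_false, Prod.mk.injEq]
        constructor
        · rw [hk, h2m1]
        · have : Nat.fib (2 * m + 1 + 1) = Nat.fib (2 * m) + Nat.fib (2 * m + 1) :=
            Nat.fib_add_two
          rw [hk, this]; push_cast [h2mZ, h2m1]; ring
      · have hk : k = 2 * m := by omega
        simp only [hodd, if_false, dite_false, Prod.mk.injEq]
        constructor
        · rw [hk, h2mZ]
        · rw [hk, h2m1]

-- value of ONE[j] resp. ZERO[j] after the loop has filled indices < i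
def oneV (i j : Nat) : Int :=
  if j = 0 then 1 else if j < i then (Nat.fib (j - 1) : Int) else 0

def zeroV (i j : Nat) : Int :=
  if j < i then (Nat.fib j : Int) else 0

def LoopInv (N i : Nat) (st : List Int × List Int) : Prop :=
  st.1.length = N ∧ st.2.length = N ∧
  (∀ j, j < N → st.1.getD j 0 = oneV i j) ∧
  (∀ j, j < N → st.2.getD j 0 = zeroV i j)

theorem getD_set_eq (l : List Int) (i j : Nat) (v : Int) (hj : j < l.length) :
    (l.set i v).getD j 0 = if i = j then v else l.getD j 0 := by
  rw [List.getD_eq_getElem _ _ (by simpa using hj), List.getElem_set,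
      List.getD_eq_getElem _ _ hj]

theorem getElem_init (x y : Int) (m j : Nat) (h : j < 2 + m) :
    ([x, y] ++ List.replicate m (0 : Int))[j]'(by simp; omega) =
      if j = 0 then x else if j = 1 then y else 0 := by
  match j with
  | 0 => simp
  | 1 => simp
  | j + 2 =>
    have : j < m := by omega
    simp [List.getElem_replicate, List.getElem_cons_succ]

theorem inv_init (N : Nat) (hN : 3 ≤ N) :
    LoopInv N 2 ([1, 0] ++ List.replicate (N - 2) (0 : Int),
             [0, 1] ++ List.replicate (N - 2) (0 : Int)) := by
  have hlen : 2 + (N - 2) = N := by omega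
  refine ⟨by simp [List.length_replicate]; omega, by simp [List.length_replicate]; omega, ?_, ?_⟩
  · intro j h
    rw [List.getD_eq_getElem _ _ (by simp; omega), getElem_init 1 0 (N - 2) j (by omega)]
    unfold oneV
    rcases j with _ | _ | j <;> simp <;> omega
  · intro j h
    rw [List.getD_eq_getElem _ _ (by simp; omega), getElem_init 0 1 (N - 2) j (by omega)]
    unfold zeroV
    rcases j with _ | _ | j <;> simp [Nat.fib]

theorem inv_step (N i : Nat) (st : List Int × List Int)
    (h2 : 2 ≤ i) (hiN : i < N) (hinv : LoopInv N i st) :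
    LoopInv N (i + 1) (solveStep st (i : Int)) := by
  obtain ⟨hl1, hl2, hone, hzero⟩ := hinv
  have hcast : (i : Int) - 1 = ((i - 1 : Nat) : Int) := by omega
  -- the two reads
  have hi1N : i - 1 < N := by omega
  have hread2 : PySem.List.pyGetD st.2 ((i : Int) - 1) 0 = zeroV i (i - 1) := by
    rw [hcast, PySem.List.pyGetD_natCast]
    exact hzero (i - 1) (by omega)
  have honeSet : PySem.List.pySetD st.1 (i : Int) (PySem.List.pyGetD st.2 ((i:Int) - 1) 0)
      = st.1.set i (zeroV i (i - 1)) := by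
    rw [hread2, PySem.List.pySetD_natCast]
  have hread1 : PySem.List.pyGetD (st.1.set i (zeroV i (i - 1))) ((i : Int) - 1) 0
      = oneV i (i - 1) := by
    rw [hcast, PySem.List.pyGetD_natCast, getD_set_eq _ _ _ _ (by omega),
        if_neg (by omega : ¬ i = i - 1)]
    exact hone (i - 1) (by omega)
  unfold solveStep
  simp only [hread1, hread2, PySem.List.pySetD_natCast]
  refine ⟨by simpa using hl1, by simpa using hl2, ?_, ?_⟩
  · intro j h
    rw [getD_set_eq _ _ _ _ (by omega)]
    by_cases hij : i = j
    · subst hij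
      unfold zeroV oneV
      simp only [if_pos rfl, if_pos (by omega : i - 1 < i), if_neg (by omega : ¬ i = 0),
        if_pos (by omega : i < i + 1)]
      simp
    · rw [if_neg hij, hone j h]
      unfold oneV
      by_cases hj0 : j = 0
      · simp [hj0]
      · rw [if_neg hj0, if_neg hj0]
        by_cases hji : j < i
        · rw [if_pos hji, if_pos (by omega)]
        · rw [if_neg hji, if_neg (by omega)]
  · intro j h
    rw [getD_set_eq _ _ _ _ (by omega)]
    by_cases hij : i = j
    · subst hij
      unfold zeroV oneV
      simp only [if_pos rfl, if_pos (by omega : i - 1 < i), if_neg (by omega : ¬ i - 1 = 0),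
        if_pos (by omega : i < i + 1)]
      simp only [if_true]
      have : Nat.fib i = Nat.fib (i - 1 - 1) + Nat.fib (i - 1) := by
        have := Nat.fib_add_two (n := i - 2)
        have h1 : i - 2 + 2 = i := by omega
        have h2 : i - 2 + 1 = i - 1 := by omega
        have h3 : i - 1 - 1 = i - 2 := by omega
        rw [h1, h2] at this; rw [h3, this]
      rw [this]; push_cast; ring
    · rw [if_neg hij, hzero j h]
      unfold zeroV
      by_cases hji : j < i
      · rw [if_pos hji, if_pos (by omega)]
      · rw [if_neg hji, if_neg (by omega)]

theorem inv_loop (N : Nat) (hN : 3 ≤ N) (t : Nat) (ht : 2 + t ≤ N) :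
    LoopInv N (2 + t)
      ((PySem.List.pyRange 2 (2 + t : Nat) 1).foldl solveStep
        ([1, 0] ++ List.replicate (N - 2) (0 : Int),
         [0, 1] ++ List.replicate (N - 2) (0 : Int))) := by
  induction t with
  | zero =>
    rw [show ((2 + 0 : Nat) : Int) = 2 by norm_num,
        PySem.List.pyRange_one_eq_nil (by omega)]
    exact inv_init N hN
  | succ t ih =>
    have hit := ih (by omega)
    have hsplit : PySem.List.pyRange 2 ((2 + (t + 1) : Nat) : Int) 1
        = PySem.List.pyRange 2 ((2 + t : Nat) : Int) 1 ++ [((2 + t : Nat) : Int)] := by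
      have : ((2 + (t + 1) : Nat) : Int) = ((2 + t : Nat) : Int) + 1 := by push_cast; ring
      rw [this, PySem.List.pyRange_one_succ_right (by push_cast; omega)]
    rw [hsplit, List.foldl_append, List.foldl_cons, List.foldl_nil]
    have := inv_step N (2 + t) _ (by omega) (by omega) hit
    simpa [Nat.add_assoc] using this

theorem solve_eq_fib (n : Int) (hn : 2 < n) : solve n = (Nat.fib n.toNat : Int) := by
  have hneg : ¬ n ≤ 2 := by omega
  simp only [solve, if_neg hneg]
  set N := n.toNat with hNdef
  have hN : 3 ≤ N := by omega
  have hn' : n = (N : Int) := by omega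
  have hrep : (n - 2).toNat = N - 2 := by omega
  have hinv : LoopInv N N ((PySem.List.pyRange 2 n 1).foldl solveStep
      ([1, 0] ++ List.replicate (N - 2) (0 : Int),
       [0, 1] ++ List.replicate (N - 2) (0 : Int))) := by
    have := inv_loop N hN (N - 2) (by omega)
    have he : 2 + (N - 2) = N := by omega
    rw [he] at this
    rw [hn']
    exact_mod_cast this
  rw [hrep]
  set st := (PySem.List.pyRange 2 n 1).foldl solveStep
      ([1, 0] ++ List.replicate (N - 2) (0 : Int),
       [0, 1] ++ List.replicate (N - 2) (0 : Int)) with hst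
  obtain ⟨hl1, hl2, hone, hzero⟩ := hinv
  have e1 : PySem.List.pyGetD st.1 (-1) 0 = oneV N (N - 1) := by
    rw [PySem.List.pyGetD_neg_ofNat st.1 1 0 (by omega) (by omega),
        ← List.getD_eq_getElem _ 0 (by omega), hl1]
    exact hone (N - 1) (by omega)
  have e2 : PySem.List.pyGetD st.2 (-1) 0 = zeroV N (N - 1) := by
    rw [PySem.List.pyGetD_neg_ofNat st.2 1 0 (by omega) (by omega),
        ← List.getD_eq_getElem _ 0 (by omega), hl2]
    exact hzero (N - 1) (by omega)
  rw [e1, e2]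
  unfold oneV zeroV
  rw [if_neg (by omega : ¬ N - 1 = 0), if_pos (by omega : N - 1 < N),
      if_pos (by omega : N - 1 < N)]
  have hfib : Nat.fib N = Nat.fib (N - 1 - 1) + Nat.fib (N - 1) := by
    have := Nat.fib_add_two (n := N - 2)
    have h1 : N - 2 + 2 = N := by omega
    have h2 : N - 2 + 1 = N - 1 := by omega
    have h3 : N - 1 - 1 = N - 2 := by omega
    rw [h1, h2] at this; rw [h3, this]
  rw [hfib]; push_cast; ring

-- ===== VERDICT (by name: the statement is the Claim_ definition above) =====
theorem solve_spec : Claim_equal_solve := by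
  intro n _hdom
  unfold Spec_solve solve_alt
  by_cases h : n ≤ 2
  · rw [if_pos h]; unfold solve; rw [if_pos h]
  · rw [if_neg h, fd_eq, solve_eq_fib n (by omega)]
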